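-- pv_equiv track=rewrite | github.com/caoyu-noob/D3 | attention_experiment/get_target_samples.py | get_dataset_and_history_positions
-- ===== SOURCE A (Python) =====
-- def get_dataset_and_history_positions(data):
--     dataset = []
--     positions = []
--     for chat in data:
--         persona_info = [s.split() for s in chat['persona_info']]
--         dialog = []
--         for i, replica in enumerate(chat['dialog'], 1):
--             dialog.append(replica.split())
--             if not i % 2:
--                 dataset.append((persona_info, dialog[:], []))
--                 persona_len = [len(x) for x in persona_info]
--                 dialog_len = [len(x) for x in dialog]
--                 persona_pos, history_pos = [], []
--                 p = 1
--                 for l in persona_len: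
--                     p = p + l
--                     persona_pos.append(p)
--                 for j in range(max(len(dialog_len) - 6, 0), len(dialog_len) - 1):
--                     p = p + 1 + dialog_len[j]
--                     history_pos.append(p)
--                 positions.append([persona_pos, history_pos])
--     for i, data in enumerate(dataset):
--         dataset[i] = [[' '.join(p) for p in data[0]], [' '.join(u) for u in data[1]]]
--     return dataset, positions
-- ===== SOURCE B (Python) =====
-- def _ppos(persona_tok, p):
--     # cumulative persona positions, built by cons-recursion
--     if not persona_tok:
--         return []
--     q = p + len(persona_tok[0])
--     return [q] + _ppos(persona_tok[1:], q)
--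
--
-- def _hpos(window, p):
--     # cumulative history positions over an explicit window slice
--     if not window:
--         return []
--     q = p + 1 + len(window[0])
--     return [q] + _hpos(window[1:], q)
--
--
-- def _snaps(pj, pp, base, dtok, dj, i):
--     # snapshots for even indices i, i+2, ... built back-to-front
--     if i > len(dtok):
--         return [], []
--     hp = _hpos(dtok[max(i - 6, 0):i - 1], base)
--     ds, ps = _snaps(pj, pp, base, dtok, dj, i + 2)
--     return [[pj, dj[:i]]] + ds, [[pp, hp]] + ps
--
--
-- def get_dataset_and_history_positions(data):
--     if not data:
--         return [], []
--     chat = data[0]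
--     persona_tok = [s.split() for s in chat['persona_info']]
--     persona_joined = [' '.join(t) for t in persona_tok]
--     persona_pos = _ppos(persona_tok, 1)
--     base = 1 + sum(len(t) for t in persona_tok)
--     dialog_tok = [u.split() for u in chat['dialog']]
--     dialog_joined = [' '.join(t) for t in dialog_tok]
--     ds, ps = _snaps(persona_joined, persona_pos, base,
--                     dialog_tok, dialog_joined, 2)
--     ds_rest, ps_rest = get_dataset_and_history_positions(data[1:])
--     return ds + ds_rest, ps + ps_rest
-- ===== Notes on version B (the rewrite author's own statement) =====
-- stated objective: alternative
-- what changed: B is fully recursive where A is iterative: recursion over chats, cons-recursion over even snapshot indices built back-to-front, history positions computed by recursion over an explicitly sliced 6-utterance window from a fixed base (sum of persona token counts), with utterances joined inline so A's threaded running accumulator, its per-snapshot rescan of all lengths and its separate final re-join pass all disappear.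
import Mathlib
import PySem

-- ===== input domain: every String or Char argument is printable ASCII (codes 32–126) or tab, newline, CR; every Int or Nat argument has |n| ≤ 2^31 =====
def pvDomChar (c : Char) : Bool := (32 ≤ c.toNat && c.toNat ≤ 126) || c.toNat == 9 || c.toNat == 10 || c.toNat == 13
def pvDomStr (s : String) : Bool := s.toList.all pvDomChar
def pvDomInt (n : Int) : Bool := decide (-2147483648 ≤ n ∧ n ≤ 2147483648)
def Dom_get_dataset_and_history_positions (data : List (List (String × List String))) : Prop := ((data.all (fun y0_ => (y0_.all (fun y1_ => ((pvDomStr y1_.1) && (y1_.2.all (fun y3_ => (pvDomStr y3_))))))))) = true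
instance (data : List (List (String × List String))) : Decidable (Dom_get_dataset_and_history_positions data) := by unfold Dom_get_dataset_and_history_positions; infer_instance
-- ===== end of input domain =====

-- B is recursive where A is iterative: recursion over chats and cons-recursion over even snapshot
-- indices, positions computed by recursion over an explicit window slice from a fixed persona base,
-- joining inline; no running accumulator and no final re-join pass (objective: alternative).

-- ===== PORT A =====
-- A's snapshot tuples carry a third component that is always [] and is dropped by the final
-- rewrite pass; the port carries the (persona_info, dialog) pair that the rewrite actually reads.
-- body of A's 'for i, replica in enumerate(chat['dialog'], 1)' loop
def pvA_inner (persona_info : List (List String))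
    (st2 : List (List String) × (List (List (List String) × List (List String)) × List (List (List Int))))
    (ir : Int × String) :
    List (List String) × (List (List (List String) × List (List String)) × List (List (List Int))) :=
  let dialog := st2.1 ++ [PySem.Str.split₀ ir.2]
  if PySem.Int.mod ir.1 2 == 0 then
    let persona_len := persona_info.map (fun x => (x.length : Int))
    let dialog_len := dialog.map (fun x => (x.length : Int))
    let pscan := persona_len.foldl (fun (q : Int × List Int) l => (q.1 + l, q.2 ++ [q.1 + l])) (1, [])
    let hscan := (PySem.List.pyRange (max ((dialog_len.length : Int) - 6) 0) ((dialog_len.length : Int) - 1) 1).foldl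
      (fun (q : Int × List Int) j =>
        (q.1 + 1 + PySem.List.pyGetD dialog_len j 0, q.2 ++ [q.1 + 1 + PySem.List.pyGetD dialog_len j 0]))
      (pscan.1, [])
    (dialog, (st2.2.1 ++ [(persona_info, dialog)], st2.2.2 ++ [[pscan.2, hscan.2]]))
  else (dialog, st2.2)

-- body of A's 'for chat in data' loop
def pvA_chat (st : List (List (List String) × List (List String)) × List (List (List Int)))
    (chat : List (String × List String)) :
    List (List (List String) × List (List String)) × List (List (List Int)) :=
  let persona_info := ((PySem.Dict.ofList chat).getD "persona_info" []).map (fun s => PySem.Str.split₀ s)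
  ((PySem.List.enumerate ((PySem.Dict.ofList chat).getD "dialog" []) 1).foldl (pvA_inner persona_info) ([], st)).2

-- A's final rewrite 'dataset[i] = [[' '.join(p) …], [' '.join(u) …]]'
def pvA_join (d : List (List String) × List (List String)) : List (List String) :=
  [d.1.map (fun p => PySem.Str.join " " p), d.2.map (fun u => PySem.Str.join " " u)]

def get_dataset_and_history_positions (data : List (List (String × List String))) :
    List (List (List String)) × List (List (List Int)) :=
  let st := data.foldl pvA_chat ([], [])
  (st.1.map pvA_join, st.2)

-- ===== PORT B =====
-- Source B's _ppos: cumulative persona positions by cons-recursion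
def pvB_ppos : List (List String) → Int → List Int
  | [], _ => []
  | t :: ts, p => (p + (t.length : Int)) :: pvB_ppos ts (p + (t.length : Int))

-- Source B's _hpos: cumulative history positions over an explicit window slice
def pvB_hpos : List (List String) → Int → List Int
  | [], _ => []
  | w :: ws, p => (p + 1 + (w.length : Int)) :: pvB_hpos ws (p + 1 + (w.length : Int))

-- Source B's _snaps: snapshots for even indices i, i+2, … built back-to-front
def pvB_snaps (pj : List String) (pp : List Int) (base : Int)
    (dtok : List (List String)) (dj : List String) (i : Int) :
    List (List (List String)) × List (List (List Int)) :=
  if h : (dtok.length : Int) < i then ([], [])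
  else
    let hp := pvB_hpos (PySem.List.slice dtok (some (max (i - 6) 0)) (some (i - 1))) base
    let rest := pvB_snaps pj pp base dtok dj (i + 2)
    ([pj, PySem.List.slice dj none (some i)] :: rest.1, [pp, hp] :: rest.2)
termination_by ((dtok.length : Int) + 2 - i).toNat
decreasing_by omega

def get_dataset_and_history_positions_alt : List (List (String × List String)) →
    List (List (List String)) × List (List (List Int))
  | [] => ([], [])
  | chat :: rest =>
    let persona_tok := ((PySem.Dict.ofList chat).getD "persona_info" []).map (fun s => PySem.Str.split₀ s)
    let persona_joined := persona_tok.map (fun t => PySem.Str.join " " t)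
    let persona_pos := pvB_ppos persona_tok 1
    let base := 1 + (persona_tok.map (fun t => (t.length : Int))).sum
    let dialog_tok := ((PySem.Dict.ofList chat).getD "dialog" []).map (fun s => PySem.Str.split₀ s)
    let dialog_joined := dialog_tok.map (fun t => PySem.Str.join " " t)
    let sp := pvB_snaps persona_joined persona_pos base dialog_tok dialog_joined 2
    let r := get_dataset_and_history_positions_alt rest
    (sp.1 ++ r.1, sp.2 ++ r.2)

-- ===== PRECONDITION & SPEC =====
-- Pre_ excludes exactly the chats missing the 'persona_info' or 'dialog' key, on which Python A
-- raises KeyError.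
def Pre_get_dataset_and_history_positions (data : List (List (String × List String))) : Prop :=
  ∀ chat ∈ data, (PySem.Dict.ofList chat).contains "persona_info" = true ∧
                 (PySem.Dict.ofList chat).contains "dialog" = true
instance (data : List (List (String × List String))) : Decidable (Pre_get_dataset_and_history_positions data) := by
  unfold Pre_get_dataset_and_history_positions; infer_instance
def pvWitness_get_dataset_and_history_positions : (List (List (String × List String))) :=
  [[("persona_info", ["i like tea", "i ski"]), ("dialog", ["hi there", "hello", "how are you", "fine"])]]
def Spec_get_dataset_and_history_positions (data : List (List (String × List String))) (out : List (List (List String)) × List (List (List Int))) : Prop := out = get_dataset_and_history_positions_alt data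
instance (data : List (List (String × List String))) (out : List (List (List String)) × List (List (List Int))) : Decidable (Spec_get_dataset_and_history_positions data out) := by unfold Spec_get_dataset_and_history_positions; infer_instance

-- ===== CLAIM (what is proved, stated in full; the proofs are below) =====
def Claim_equal_get_dataset_and_history_positions : Prop := ∀ (data : List (List (String × List String))), Dom_get_dataset_and_history_positions data → Pre_get_dataset_and_history_positions data → Spec_get_dataset_and_history_positions data (get_dataset_and_history_positions data)

-- ===== LEMMAS AND PROOFS =====

-- canonical per-chat descriptions both ports are reduced to
def pvPS (ls : List Int) (k : Nat) : Int := (ls.take k).sum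
def pvSplitToks (ss : List String) : List (List String) := ss.map (fun s => PySem.Str.split₀ s)
def pvLens (ts : List (List String)) : List Int := ts.map (fun x => (x.length : Int))
def pvJoinAll (ts : List (List String)) : List String := ts.map (fun t => PySem.Str.join " " t)
def pvPPos (plen : List Int) : List Int := (List.range plen.length).map (fun k => 1 + pvPS plen (k + 1))
def pvHist (plen dlen : List Int) (i : Nat) : List Int :=
  (List.range (i - 1 - (i - 6))).map
    (fun (k : Nat) => 1 + plen.sum + ((k : Int) + 1) + pvPS dlen (i - 6 + k + 1) - pvPS dlen (i - 6))
def pvPersona (chat : List (String × List String)) : List (List String) :=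
  pvSplitToks ((PySem.Dict.ofList chat).getD "persona_info" [])
def pvDialog (chat : List (String × List String)) : List (List String) :=
  pvSplitToks ((PySem.Dict.ofList chat).getD "dialog" [])
def pvRawOf (chat : List (String × List String)) : List (List (List String) × List (List String)) :=
  (List.range ((pvDialog chat).length / 2)).map (fun m => (pvPersona chat, (pvDialog chat).take (2 * m + 2)))
def pvPosOf (chat : List (String × List String)) : List (List (List Int)) :=
  (List.range ((pvDialog chat).length / 2)).map
    (fun m => [pvPPos (pvLens (pvPersona chat)), pvHist (pvLens (pvPersona chat)) (pvLens (pvDialog chat)) (2 * m + 2)])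
def pvDOf (chat : List (String × List String)) : List (List (List String)) :=
  (List.range ((pvDialog chat).length / 2)).map
    (fun m => [pvJoinAll (pvPersona chat), (pvJoinAll (pvDialog chat)).take (2 * m + 2)])

lemma pvPS_cons (a : Int) (ls : List Int) (k : Nat) : pvPS (a :: ls) (k + 1) = a + pvPS ls k := by
  simp [pvPS]

lemma pvPS_succ (ls : List Int) (k : Nat) (h : k < ls.length) :
    pvPS ls (k + 1) = pvPS ls k + ls.getD k 0 := by
  rw [pvPS, pvPS, List.take_add_one, List.getElem?_eq_getElem h]
  simp [h]

lemma pv_scan {α : Type} (xs : List α) (f : α → Int) (p0 : Int) (acc : List Int) :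
    xs.foldl (fun (q : Int × List Int) x => (q.1 + f x, q.2 ++ [q.1 + f x])) (p0, acc)
      = (p0 + (xs.map f).sum,
         acc ++ (List.range xs.length).map (fun k => p0 + pvPS (xs.map f) (k + 1))) := by
  induction xs generalizing p0 acc with
  | nil => simp [pvPS]
  | cons x xs ih =>
    simp only [List.foldl_cons, ih, List.map_cons, List.sum_cons, List.length_cons]
    refine Prod.ext (by ring) ?_
    simp only [List.range_succ_eq_map, List.map_cons, List.map_map, Function.comp_def, pvPS_cons]
    simp [add_assoc]
    simp [pvPS]

lemma pv_sumwin (ls : List Int) (s m : Nat) (h : s + m ≤ ls.length) :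
    ((List.range m).map (fun t => ls.getD (s + t) 0)).sum = pvPS ls (s + m) - pvPS ls s := by
  induction m with
  | zero => simp
  | succ m ih =>
    rw [List.range_succ, List.map_append, List.sum_append, ih (by omega)]
    rw [show s + (m+1) = (s + m) + 1 by omega, pvPS_succ ls (s+m) (by omega)]
    simp
    ring

lemma pv_sum_one_add (m : Nat) (g : Nat → Int) :
    ((List.range m).map (fun t => 1 + g t)).sum = m + ((List.range m).map g).sum := by
  induction m with
  | zero => simp
  | succ m ih => rw [List.range_succ]; simp [ih]; ring

lemma pv_getD_take (ls : List Int) (n i : Nat) (h : i < n) :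
    (ls.take n).getD i 0 = ls.getD i 0 := by
  simp only [List.getD_eq_getElem?_getD]
  rw [List.getElem?_take_of_lt h]

lemma pv_histA (plen dlen : List Int) (i' : Nat) (h2 : 2 ≤ i') (hn : i' ≤ dlen.length) :
    ((PySem.List.pyRange (max (((dlen.take i').length : Int) - 6) 0) (((dlen.take i').length : Int) - 1) 1).foldl
      (fun (q : Int × List Int) j =>
        (q.1 + 1 + PySem.List.pyGetD (dlen.take i') j 0, q.2 ++ [q.1 + 1 + PySem.List.pyGetD (dlen.take i') j 0]))
      (1 + plen.sum, [])).2
    = pvHist plen dlen i' := by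
  have hlen : ((dlen.take i').length : Int) = (i' : Int) := by
    simp [List.length_take]; omega
  rw [hlen]
  have ha : max ((i' : Int) - 6) 0 = ((i' - 6 : Nat) : Int) := by
    rcases le_total ((i' : Int) - 6) 0 with h | h
    · rw [max_eq_right h]; omega
    · rw [max_eq_left h]; omega
  rw [ha]
  have hb : (fun (q : Int × List Int) j =>
        (q.1 + 1 + PySem.List.pyGetD (dlen.take i') j 0, q.2 ++ [q.1 + 1 + PySem.List.pyGetD (dlen.take i') j 0]))
      = (fun (q : Int × List Int) j =>
        (q.1 + (1 + PySem.List.pyGetD (dlen.take i') j 0), q.2 ++ [q.1 + (1 + PySem.List.pyGetD (dlen.take i') j 0)])) := by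
    funext q j; simp [add_assoc]
  rw [hb, pv_scan]
  have hL : (PySem.List.pyRange ((i' - 6 : Nat) : Int) ((i' : Int) - 1) 1).length = i' - 1 - (i' - 6) := by
    rw [PySem.List.pyRange_one]; simp only [List.length_map, List.length_range]; omega
  simp only [pvHist, List.nil_append]
  rw [hL]
  apply List.map_congr_left
  intro k hk
  have hkL : k < i' - 1 - (i' - 6) := List.mem_range.mp hk
  rw [PySem.List.pyRange_one, pvPS, List.map_map, ← List.map_take, List.take_range]
  have hmin : min (k + 1) ((i' : Int) - 1 - ((i' - 6 : Nat) : Int)).toNat = k + 1 := by omega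
  rw [hmin]
  have hcong : (List.range (k+1)).map ((fun j => 1 + PySem.List.pyGetD (dlen.take i') j 0) ∘ (fun (t : Nat) => ((i' - 6 : Nat) : Int) + (t : Int)))
      = (List.range (k+1)).map (fun t => 1 + dlen.getD (i' - 6 + t) 0) := by
    apply List.map_congr_left
    intro t ht
    have htk : t < k + 1 := List.mem_range.mp ht
    have hcast : ((i' - 6 : Nat) : Int) + (t : Int) = ((i' - 6 + t : Nat) : Int) := by push_cast; ring
    simp only [Function.comp_def, hcast, PySem.List.pyGetD_natCast]
    rw [pv_getD_take dlen i' (i' - 6 + t) (by omega)]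
  rw [hcong, pv_sum_one_add, pv_sumwin dlen (i' - 6) (k + 1) (by omega)]
  push_cast
  ring_nf

lemma pv_evens_step {α : Type} (n m : Nat) (hmlt : m < n) (hpar : (m + 1) % 2 = 0) (g : Nat → α) :
    (List.range (n / 2 - m / 2)).map (fun t => g (2 * (m / 2 + t) + 2))
    = g (m + 1) :: (List.range (n / 2 - (m + 1) / 2)).map (fun t => g (2 * ((m + 1) / 2 + t) + 2)) := by
  have h1 : n / 2 - m / 2 = (n / 2 - (m + 1) / 2) + 1 := by omega
  rw [h1, List.range_succ_eq_map, List.map_cons, List.map_map]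
  congr 1
  · congr 1; omega
  · apply List.map_congr_left
    intro t _
    simp only [Function.comp_def]
    congr 1
    omega

lemma pv_inner (pers : List (List String)) (full : List String) :
    ∀ (rest : List String) (m : Nat), full.drop m = rest → m ≤ full.length →
    ∀ (ds : List (List (List String) × List (List String))) (ps : List (List (List Int))),
    ((PySem.List.enumerate rest ((m : Int) + 1)).foldl (pvA_inner pers)
      (pvSplitToks (full.take m), (ds, ps))).2
    = (ds ++ (List.range (full.length / 2 - m / 2)).map
          (fun t => (pers, pvSplitToks (full.take (2 * (m / 2 + t) + 2)))),
       ps ++ (List.range (full.length / 2 - m / 2)).map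
          (fun t => [pvPPos (pvLens pers), pvHist (pvLens pers) (pvLens (pvSplitToks full)) (2 * (m / 2 + t) + 2)])) := by
  intro rest
  induction rest with
  | nil =>
    intro m hdrop hm ds ps
    have hlen : full.length ≤ m := by
      have := congrArg List.length hdrop
      simp [List.length_drop] at this
      omega
    have hz : full.length / 2 - m / 2 = 0 := by omega
    simp [PySem.List.enumerate, hz]
  | cons u rest' ih =>
    intro m hdrop hm ds ps
    have hmlt : m < full.length := by
      have := congrArg List.length hdrop
      simp [List.length_drop] at this
      omega
    have hgm : full[m]? = some u := by
      have h0 := congrArg (fun (l : List String) => l[0]?) hdrop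
      simpa using h0
    have htake : full.take (m + 1) = full.take m ++ [u] := by
      rw [List.take_add_one, hgm]
      rfl
    have hdrop' : full.drop (m + 1) = rest' := by
      have h0 := congrArg List.tail hdrop
      simpa [List.tail_drop] using h0
    have hfoldL : ∀ ts : List (List String), ts.map (fun x => (x.length : Int)) = pvLens ts := fun _ => rfl
    have htoks : pvSplitToks (full.take m) ++ [PySem.Str.split₀ u] = pvSplitToks (full.take (m + 1)) := by
      rw [htake]; simp [pvSplitToks]
    have hmod : PySem.Int.mod ((m : Int) + 1) 2 = (((m + 1) % 2 : Nat) : Int) := by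
      rw [show ((m : Int) + 1) = ((m + 1 : Nat) : Int) by push_cast; ring]
      exact_mod_cast PySem.Int.mod_natCast (m + 1) 2
    have hidx : (m : Int) + 1 + 1 = ((m + 1 : Nat) : Int) + 1 := by push_cast; ring
    rw [PySem.List.enumerate_cons, List.foldl_cons]
    by_cases hpar : (m + 1) % 2 = 0
    · -- even index: a snapshot is appended
      have hstep : pvA_inner pers (pvSplitToks (full.take m), (ds, ps)) ((m : Int) + 1, u)
          = (pvSplitToks (full.take (m + 1)),
             (ds ++ [(pers, pvSplitToks (full.take (m + 1)))],
              ps ++ [[pvPPos (pvLens pers), pvHist (pvLens pers) (pvLens (pvSplitToks full)) (m + 1)]])) := by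
        simp only [pvA_inner, hmod, hpar, htoks, hfoldL]
        simp only [Nat.cast_zero, beq_self_eq_true, if_pos]
        rw [pv_scan]
        simp only [List.map_id', List.nil_append]
        have hdl : pvLens (pvSplitToks (full.take (m + 1))) = (pvLens (pvSplitToks full)).take (m + 1) := by
          simp [pvLens, pvSplitToks, List.map_take]
        rw [hdl, pv_histA (pvLens pers) (pvLens (pvSplitToks full)) (m + 1) (by omega)
              (by simp [pvLens, pvSplitToks]; omega)]
        rfl
      rw [hstep, hidx, ih (m + 1) hdrop' (by omega) _ _]
      rw [pv_evens_step full.length m hmlt hpar (fun i => (pers, pvSplitToks (full.take i))),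
          pv_evens_step full.length m hmlt hpar
            (fun i => [pvPPos (pvLens pers), pvHist (pvLens pers) (pvLens (pvSplitToks full)) i])]
      simp
    · -- odd index: state unchanged
      have hpar1 : (m + 1) % 2 = 1 := by omega
      have hstep : pvA_inner pers (pvSplitToks (full.take m), (ds, ps)) ((m : Int) + 1, u)
          = (pvSplitToks (full.take (m + 1)), (ds, ps)) := by
        simp only [pvA_inner, hmod, hpar1, htoks]
        norm_num
      rw [hstep, hidx, ih (m + 1) hdrop' (by omega) _ _]
      have h2 : m / 2 = (m + 1) / 2 := by omega
      rw [h2]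

lemma pvSplitToks_take (ss : List String) (n : Nat) :
    pvSplitToks (ss.take n) = (pvSplitToks ss).take n := by
  simp [pvSplitToks, List.map_take]

lemma pvA_chat_eq (st : List (List (List String) × List (List String)) × List (List (List Int)))
    (chat : List (String × List String)) :
    pvA_chat st chat = (st.1 ++ pvRawOf chat, st.2 ++ pvPosOf chat) := by
  obtain ⟨ds, ps⟩ := st
  simp only [pvA_chat]
  have hsplit : ((PySem.Dict.ofList chat).getD "persona_info" []).map (fun s => PySem.Str.split₀ s) = pvPersona chat := rfl
  rw [hsplit]
  have h := pv_inner (pvPersona chat) ((PySem.Dict.ofList chat).getD "dialog" [])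
      ((PySem.Dict.ofList chat).getD "dialog" []) 0 rfl (by omega) ds ps
  simp only [Nat.cast_zero, zero_add, List.take_zero, Nat.zero_div] at h
  have hsp : pvSplitToks ([] : List String) = [] := rfl
  rw [hsp] at h
  rw [h]
  simp only [pvRawOf, pvPosOf, pvSplitToks_take]
  simp [pvDialog, pvSplitToks]

lemma pvA_outer (data : List (List (String × List String))) :
    ∀ st, data.foldl pvA_chat st
      = (st.1 ++ data.flatMap pvRawOf, st.2 ++ data.flatMap pvPosOf) := by
  induction data with
  | nil => intro st; simp
  | cons c data ih =>
    intro st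
    rw [List.foldl_cons, ih, pvA_chat_eq]
    simp [List.append_assoc]

lemma pv_join_raw (chat : List (String × List String)) :
    (pvRawOf chat).map pvA_join = pvDOf chat := by
  simp only [pvRawOf, pvDOf, List.map_map]
  apply List.map_congr_left
  intro m hm
  simp [pvA_join, pvJoinAll, pvPersona, pvDialog, List.map_take]

-- ===== B-side lemmas =====

lemma pvB_ppos_eq (ts : List (List String)) (p : Int) :
    pvB_ppos ts p = (List.range ts.length).map (fun k => p + pvPS (pvLens ts) (k + 1)) := by
  induction ts generalizing p with
  | nil => simp [pvB_ppos]
  | cons t ts ih =>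
    rw [pvB_ppos, ih]
    simp only [pvLens, List.map_cons, List.length_cons, List.range_succ_eq_map, List.map_map,
      Function.comp_def, Nat.succ_eq_add_one, pvPS_cons]
    refine List.cons_eq_cons.mpr ⟨by simp [pvPS], ?_⟩
    apply List.map_congr_left; intro k _; ring

lemma pvB_hpos_eq (ws : List (List String)) (p : Int) :
    pvB_hpos ws p = (List.range ws.length).map (fun (k : Nat) => p + ((k : Int) + 1) + pvPS (pvLens ws) (k + 1)) := by
  induction ws generalizing p with
  | nil => simp [pvB_hpos]
  | cons w ws ih =>
    rw [pvB_hpos, ih]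
    simp only [pvLens, List.map_cons, List.length_cons, List.range_succ_eq_map, List.map_map,
      Function.comp_def, Nat.succ_eq_add_one, pvPS_cons]
    refine List.cons_eq_cons.mpr ⟨by simp [pvPS], ?_⟩
    apply List.map_congr_left; intro k _; push_cast; ring

lemma pvPS_drop_take (ls : List Int) (s m k : Nat) (hk : k ≤ m) :
    pvPS ((ls.drop s).take m) k = pvPS ls (s + k) - pvPS ls s := by
  rw [pvPS, List.take_take, min_eq_left hk, pvPS, pvPS, List.take_add, List.sum_append]
  ring

lemma pvB_hpos_window (plen dlen : List Int) (dtok : List (List String)) (i' : Nat)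
    (hdl : pvLens dtok = dlen) (h2 : 2 ≤ i') (hn : i' ≤ dtok.length) :
    pvB_hpos (PySem.List.slice dtok (some (max (((i' : Nat) : Int) - 6) 0)) (some (((i' : Nat) : Int) - 1))) (1 + plen.sum)
    = pvHist plen dlen i' := by
  have ha : max (((i' : Nat) : Int) - 6) 0 = ((i' - 6 : Nat) : Int) := by omega
  have hb : ((i' : Nat) : Int) - 1 = ((i' - 1 : Nat) : Int) := by omega
  rw [ha, hb, PySem.List.slice_natCast, pvB_hpos_eq]
  have hwl : ((dtok.drop (i' - 6)).take (i' - 1 - (i' - 6))).length = i' - 1 - (i' - 6) := by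
    simp [List.length_take, List.length_drop]; omega
  have hwlens : pvLens ((dtok.drop (i' - 6)).take (i' - 1 - (i' - 6)))
      = ((dlen.drop (i' - 6)).take (i' - 1 - (i' - 6))) := by
    rw [← hdl]; simp [pvLens, List.map_take, List.map_drop]
  rw [hwl, hwlens, pvHist]
  apply List.map_congr_left
  intro k hk
  have hkL : k < i' - 1 - (i' - 6) := List.mem_range.mp hk
  rw [pvPS_drop_take dlen (i' - 6) (i' - 1 - (i' - 6)) (k + 1) (by omega)]
  have : i' - 6 + (k + 1) = i' - 6 + k + 1 := by omega
  rw [this]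
  ring

lemma pv_range_shift {α : Type} (n m0 : Nat) (h : m0 < n) (g : Nat → α) :
    (List.range (n - m0)).map (fun t => g (m0 + t))
    = g m0 :: (List.range (n - (m0 + 1))).map (fun t => g (m0 + 1 + t)) := by
  have h1 : n - m0 = (n - (m0 + 1)) + 1 := by omega
  rw [h1, List.range_succ_eq_map, List.map_cons, List.map_map]
  refine List.cons_eq_cons.mpr ⟨by simp, ?_⟩
  apply List.map_congr_left; intro t _; simp only [Function.comp_def]; congr 1; omega

lemma pvB_snaps_eq (pj : List String) (pp : List Int) (base : Int)
    (dtok : List (List String)) (dj : List String) :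
    ∀ (fuel m0 : Nat), dtok.length / 2 - m0 ≤ fuel →
    pvB_snaps pj pp base dtok dj ((2 * m0 + 2 : Nat) : Int)
    = ((List.range (dtok.length / 2 - m0)).map
         (fun t => [pj, PySem.List.slice dj none (some ((2 * (m0 + t) + 2 : Nat) : Int))]),
       (List.range (dtok.length / 2 - m0)).map
         (fun t => [pp, pvB_hpos (PySem.List.slice dtok
             (some (max (((2 * (m0 + t) + 2 : Nat) : Int) - 6) 0))
             (some (((2 * (m0 + t) + 2 : Nat) : Int) - 1))) base])) := by
  intro fuel
  induction fuel with
  | zero =>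
    intro m0 hf
    have hz : dtok.length / 2 - m0 = 0 := by omega
    have hguard : (dtok.length : Int) < ((2 * m0 + 2 : Nat) : Int) := by
      have : dtok.length < 2 * m0 + 2 := by omega
      exact_mod_cast this
    rw [pvB_snaps, dif_pos hguard, hz]
    simp
  | succ fuel ih =>
    intro m0 hf
    by_cases hm : m0 < dtok.length / 2
    · have hguard : ¬ ((dtok.length : Int) < ((2 * m0 + 2 : Nat) : Int)) := by
        have : 2 * m0 + 2 ≤ dtok.length := by omega
        push_neg
        exact_mod_cast this
      rw [pvB_snaps, dif_neg hguard]
      have hstep : ((2 * m0 + 2 : Nat) : Int) + 2 = ((2 * (m0 + 1) + 2 : Nat) : Int) := by push_cast; ring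
      rw [hstep, ih (m0 + 1) (by omega)]
      rw [pv_range_shift (dtok.length / 2) m0 hm
            (fun m => [pj, PySem.List.slice dj none (some ((2 * m + 2 : Nat) : Int))]),
          pv_range_shift (dtok.length / 2) m0 hm
            (fun m => [pp, pvB_hpos (PySem.List.slice dtok
               (some (max (((2 * m + 2 : Nat) : Int) - 6) 0))
               (some (((2 * m + 2 : Nat) : Int) - 1))) base])]
    · have hz : dtok.length / 2 - m0 = 0 := by omega
      have hguard : (dtok.length : Int) < ((2 * m0 + 2 : Nat) : Int) := by
        have : dtok.length < 2 * m0 + 2 := by omega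
        exact_mod_cast this
      rw [pvB_snaps, dif_pos hguard, hz]
      simp

lemma pvB_chat_pair (chat : List (String × List String)) :
    pvB_snaps (pvJoinAll (pvPersona chat)) (pvB_ppos (pvPersona chat) 1)
      (1 + ((pvPersona chat).map (fun t => (t.length : Int))).sum)
      (pvDialog chat) (pvJoinAll (pvDialog chat)) 2
    = (pvDOf chat, pvPosOf chat) := by
  have h2 : (2 : Int) = ((2 * 0 + 2 : Nat) : Int) := by norm_num
  rw [h2, pvB_snaps_eq _ _ _ _ _ ((pvDialog chat).length / 2) 0 (by omega)]
  simp only [Nat.sub_zero, Nat.zero_add]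
  refine Prod.ext ?_ ?_
  · simp only [pvDOf]
    apply List.map_congr_left
    intro m hm
    rw [PySem.List.slice_to_natCast]
  · simp only [pvPosOf]
    apply List.map_congr_left
    intro m hm
    have hm2 : m < (pvDialog chat).length / 2 := List.mem_range.mp hm
    rw [pvB_ppos_eq]
    have hpl : (pvPersona chat).length = (pvLens (pvPersona chat)).length := by simp [pvLens]
    rw [hpl]
    have hsum : ((pvPersona chat).map (fun t => (t.length : Int))).sum = (pvLens (pvPersona chat)).sum := rfl
    rw [hsum, pvB_hpos_window (pvLens (pvPersona chat)) (pvLens (pvDialog chat)) (pvDialog chat)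
          (2 * m + 2) rfl (by omega) (by omega)]
    rfl

lemma pvB_alt_eq (data : List (List (String × List String))) :
    get_dataset_and_history_positions_alt data
      = (data.flatMap pvDOf, data.flatMap pvPosOf) := by
  induction data with
  | nil => rfl
  | cons c data ih =>
    rw [get_dataset_and_history_positions_alt]
    simp only [ih]
    have h := pvB_chat_pair c
    simp only [pvJoinAll, pvPersona, pvDialog, pvSplitToks] at h
    rw [h]
    simp [List.flatMap_cons]

-- ===== VERDICT (by name: the statement is the Claim_ definition above) =====
theorem get_dataset_and_history_positions_spec : Claim_equal_get_dataset_and_history_positions := by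
  intro data hdom hpre
  unfold Spec_get_dataset_and_history_positions
  simp only [get_dataset_and_history_positions]
  rw [pvA_outer data ([], []), pvB_alt_eq]
  simp only [List.nil_append]
  refine Prod.ext ?_ rfl
  rw [List.map_flatMap]
  simp only [pv_join_raw]
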